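-- pv_equiv track=rewrite | github.com/opendp/opendp | python/test/test_ast.py | check_directive_continuity
-- ===== SOURCE A (Python) =====
-- def check_directive_continuity(docstring):
--     '''
--     >>> check_directive_continuity("""
--     ...     :param xyz: The input
--     ...     Surprise!
--     ...     :return: The output
--     ... """)
--     'Found another directive after non-directive: :return: The output'
--     '''
--     directives_started = False
--     directives_ended = False
--     for line in docstring.split('\n'):
--         line = line.strip()
--         if not line:
--             continue
--         if line.startswith(':'):
--             if directives_ended:
--                 return f'Found another directive after non-directive: {line}'
--             directives_started = True
--         elif directives_started:
--             directives_ended = True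
-- ===== SOURCE B (Python) =====
-- from itertools import groupby
--
-- def check_directive_continuity(docstring):
--     lines = [line.strip() for line in docstring.split('\n') if line.strip()]
--     runs = [list(g) for _, g in groupby(lines, key=lambda l: l.startswith(':'))]
--     if not runs:
--         return None
--     idx = 2 if runs[0][0].startswith(':') else 3
--     if idx < len(runs):
--         return f'Found another directive after non-directive: {runs[idx][0]}'
-- ===== Notes on version B (the rewrite author's own statement) =====
-- stated objective: alternative
-- what changed: Replaces A's two-boolean line-by-line state machine with a groupby decomposition: strip and drop blank lines up front, collapse them into alternating directive/non-directive runs, and read the offending line off a fixed run index (2 if the first run is a directive run, else 3).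
import Mathlib
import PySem

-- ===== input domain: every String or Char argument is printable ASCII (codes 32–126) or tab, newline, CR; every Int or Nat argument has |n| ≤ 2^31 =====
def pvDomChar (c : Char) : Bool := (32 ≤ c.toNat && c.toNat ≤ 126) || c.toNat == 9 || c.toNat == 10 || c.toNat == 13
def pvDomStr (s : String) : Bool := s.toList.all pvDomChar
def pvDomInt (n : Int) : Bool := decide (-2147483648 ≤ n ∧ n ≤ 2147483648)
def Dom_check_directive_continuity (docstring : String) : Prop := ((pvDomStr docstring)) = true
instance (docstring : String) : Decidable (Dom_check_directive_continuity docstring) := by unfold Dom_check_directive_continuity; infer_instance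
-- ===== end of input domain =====

-- B replaces A's two-flag line-by-line state machine by collapsing the stripped,
-- non-empty lines into alternating directive/non-directive runs (itertools.groupby)
-- and reading the offender off a fixed run index (objective: alternative decomposition).

-- ===== PORT A =====
-- literal transliteration of A's for-loop with the two booleans
def pvLoopA (started ended : Bool) : List String → Option String
  | [] => none
  | l :: rest =>
    let line := PySem.Str.strip l
    if line = "" then pvLoopA started ended rest
    else if PySem.Str.startswith line ":" then
      if ended then some ("Found another directive after non-directive: " ++ line)
      else pvLoopA true ended rest
    else if started then pvLoopA started true rest
    else pvLoopA started ended rest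

def check_directive_continuity (docstring : String) : Option String :=
  pvLoopA false false ((PySem.Str.split? docstring "\n").getD [])

-- ===== PORT B =====
-- key(l) = l.startswith(':')
def pvKey (l : String) : Bool := PySem.Str.startswith l ":"

-- run[0] (every run produced by groupby is non-empty)
def pvHd (r : List String) : String := r.headD ""

-- port of Source B's itertools.groupby call: consecutive lines with equal key form one run
def pvPrependRun (x : String) : List (List String) → List (List String)
  | [] => [[x]]
  | [] :: rs => [x] :: rs
  | (y :: r) :: rs =>
    if pvKey x == pvKey y then (x :: y :: r) :: rs else [x] :: (y :: r) :: rs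

def pvGroupRuns : List String → List (List String)
  | [] => []
  | x :: xs => pvPrependRun x (pvGroupRuns xs)

-- Source B after building runs: the offending run sits at a fixed index (2 or 3)
def pvAltRuns (runs : List (List String)) : Option String :=
  match runs with
  | [] => none
  | r0 :: _ =>
    let idx := if pvKey (pvHd r0) then 2 else 3
    match runs.drop idx with
    | [] => none
    | r :: _ => some ("Found another directive after non-directive: " ++ pvHd r)

def check_directive_continuity_alt (docstring : String) : Option String :=
  pvAltRuns (pvGroupRuns
    ((((PySem.Str.split? docstring "\n").getD []).map PySem.Str.strip).filter (fun l => l ≠ "")))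

-- ===== PRECONDITION & SPEC =====
def Spec_check_directive_continuity (docstring : String) (out : Option String) : Prop := out = check_directive_continuity_alt docstring
instance (docstring : String) (out : Option String) : Decidable (Spec_check_directive_continuity docstring out) := by unfold Spec_check_directive_continuity; infer_instance

-- ===== CLAIM (what is proved, stated in full; the proofs are below) =====
def Claim_equal_check_directive_continuity : Prop := ∀ (docstring : String), Dom_check_directive_continuity docstring → Spec_check_directive_continuity docstring (check_directive_continuity docstring)

-- ===== LEMMAS AND PROOFS =====

-- A's loop on the already stripped, non-empty lines
def pvCleanLoop (started ended : Bool) : List String → Option String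
  | [] => none
  | l :: rest =>
    if pvKey l then
      if ended then some ("Found another directive after non-directive: " ++ l)
      else pvCleanLoop true ended rest
    else if started then pvCleanLoop started true rest
    else pvCleanLoop started ended rest

-- A's state machine lifted to the run level (inspects only the head of each run)
def pvRunLoop (started ended : Bool) : List (List String) → Option String
  | [] => none
  | r :: rs =>
    if pvKey (pvHd r) then
      if ended then some ("Found another directive after non-directive: " ++ pvHd r)
      else pvRunLoop true ended rs
    else if started then pvRunLoop started true rs
    else pvRunLoop started ended rs

lemma pvLoopA_clean (ls : List String) : ∀ s e,
    pvLoopA s e ls = pvCleanLoop s e ((ls.map PySem.Str.strip).filter (fun l => l ≠ "")) := by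
  induction ls with
  | nil => intro s e; rfl
  | cons l rest ih =>
    intro s e
    by_cases h : PySem.Str.strip l = ""
    · simp [pvLoopA, h, ih]
    · rw [show ((l :: rest).map PySem.Str.strip).filter (fun l => l ≠ "")
            = PySem.Str.strip l :: ((rest.map PySem.Str.strip).filter (fun l => l ≠ "")) from by
          simp [h]]
      cases hs : PySem.Str.startswith (PySem.Str.strip l) ":" <;> cases s <;> cases e <;>
        simp [pvLoopA, pvCleanLoop, pvKey, h, ih]

lemma pvGroupRuns_nil_notMem (ls : List String) : [] ∉ pvGroupRuns ls := by
  induction ls with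
  | nil => simp [pvGroupRuns]
  | cons x xs ih =>
    rw [pvGroupRuns]
    cases h : pvGroupRuns xs with
    | nil => simp [pvPrependRun]
    | cons r rs =>
      rw [h] at ih
      cases r with
      | nil => exact absurd List.mem_cons_self ih
      | cons y t =>
        rw [pvPrependRun]
        split_ifs <;> simp_all

lemma pvCleanLoop_runs (ls : List String) : ∀ s e,
    pvCleanLoop s e ls = pvRunLoop s e (pvGroupRuns ls) := by
  induction ls with
  | nil => intro s e; rfl
  | cons x xs ih =>
    intro s e
    rw [pvGroupRuns]
    cases h : pvGroupRuns xs with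
    | nil =>
      have hxs : ∀ s e, pvCleanLoop s e xs = none := fun s e => by rw [ih s e, h]; rfl
      cases hx : pvKey x <;> cases s <;> cases e <;>
        simp [pvCleanLoop, pvRunLoop, pvPrependRun, pvHd, hx, hxs]
    | cons r rs =>
      cases r with
      | nil => exact absurd (h ▸ List.mem_cons_self) (pvGroupRuns_nil_notMem xs)
      | cons y t =>
        by_cases hk : pvKey x = pvKey y
        · have hbe : (pvKey x == pvKey y) = true := by simp [hk]
          cases hky : pvKey y <;> rw [hky] at hk <;> cases s <;> cases e <;>
            simp [pvCleanLoop, pvRunLoop, pvPrependRun, pvHd, hk, hky, ih, h]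
        · have hbe : (pvKey x == pvKey y) = false := by simp [hk]
          have hy : pvKey y = !pvKey x := by
            cases h1 : pvKey x <;> cases h2 : pvKey y <;> simp_all
          cases hx : pvKey x <;> rw [hx] at hy <;> cases s <;> cases e <;>
            simp [pvCleanLoop, pvRunLoop, pvPrependRun, pvHd, hx, hy, ih, h]

lemma pvGroupRuns_chain (ls : List String) :
    List.IsChain (fun a b => pvKey (pvHd a) ≠ pvKey (pvHd b)) (pvGroupRuns ls) := by
  induction ls with
  | nil => simp [pvGroupRuns]
  | cons x xs ih =>
    rw [pvGroupRuns]
    cases h : pvGroupRuns xs with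
    | nil => simp [pvPrependRun]
    | cons r rs =>
      rw [h] at ih
      cases r with
      | nil => exact absurd (h ▸ List.mem_cons_self) (pvGroupRuns_nil_notMem xs)
      | cons y t =>
        by_cases hk : pvKey x = pvKey y
        · have hbe : (pvKey x == pvKey y) = true := by simp [hk]
          rw [pvPrependRun, hbe, if_pos rfl]
          cases rs with
          | nil => simp
          | cons r2 rs2 =>
            rw [List.isChain_cons_cons] at ih ⊢
            exact ⟨by simpa [pvHd, hk] using ih.1, ih.2⟩
        · have hbe : (pvKey x == pvKey y) = false := by simp [hk]
          rw [pvPrependRun, hbe]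
          simp only [Bool.false_eq_true, if_false]
          exact List.isChain_cons_cons.mpr ⟨by simpa [pvHd] using hk, ih⟩

lemma pvRunLoop_alt (runs : List (List String))
    (hch : List.IsChain (fun a b => pvKey (pvHd a) ≠ pvKey (pvHd b)) runs) :
    pvRunLoop false false runs = pvAltRuns runs := by
  match runs with
  | [] => rfl
  | [r0] =>
    cases h0 : pvKey (pvHd r0) <;> simp [pvRunLoop, pvAltRuns, h0]
  | [r0, r1] =>
    rw [List.isChain_cons_cons] at hch
    have h1 : pvKey (pvHd r1) = !pvKey (pvHd r0) := by
      cases hk1 : pvKey (pvHd r1) <;> cases hk0 : pvKey (pvHd r0) <;> simp_all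
    cases h0 : pvKey (pvHd r0) <;> rw [h0] at h1 <;>
      simp [pvRunLoop, pvAltRuns, h0, h1]
  | r0 :: r1 :: r2 :: rest =>
    rw [List.isChain_cons_cons] at hch
    obtain ⟨h01, hch1⟩ := hch
    rw [List.isChain_cons_cons] at hch1
    obtain ⟨h12, hch2⟩ := hch1
    have h1 : pvKey (pvHd r1) = !pvKey (pvHd r0) := by
      cases hk1 : pvKey (pvHd r1) <;> cases hk0 : pvKey (pvHd r0) <;> simp_all
    have h2 : pvKey (pvHd r2) = pvKey (pvHd r0) := by
      cases hk2 : pvKey (pvHd r2) <;> cases hk1 : pvKey (pvHd r1) <;> simp_all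
    cases h0 : pvKey (pvHd r0) <;> rw [h0] at h1 h2
    · -- first run is non-directive: the offender would be run 3
      match rest with
      | [] => simp [pvRunLoop, pvAltRuns, h0, h1, h2]
      | r3 :: rest' =>
        rw [List.isChain_cons_cons] at hch2
        have h3 : pvKey (pvHd r3) = true := by
          cases hk3 : pvKey (pvHd r3) <;> simp_all
        simp [pvRunLoop, pvAltRuns, h0, h1, h2, h3]
    · -- first run is a directive: the offender is run 2
      simp [pvRunLoop, pvAltRuns, h0, h1, h2]

-- ===== VERDICT (by name: the statement is the Claim_ definition above) =====
theorem check_directive_continuity_spec : Claim_equal_check_directive_continuity := by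
  intro docstring _
  unfold Spec_check_directive_continuity check_directive_continuity check_directive_continuity_alt
  rw [pvLoopA_clean, pvCleanLoop_runs, pvRunLoop_alt _ (pvGroupRuns_chain _)]
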